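/- GENERATED by farm/mkstatement.py from design/units.tsv (unit `DGifDecompressInput.2`) and the assertions of Gif/Spec/Seg_DGifDecompressInput.lean — do not edit.
   THE STATEMENT of the proof unit `DGifDecompressInput.2`: segment 2 of `DGifDecompressInput` (24 instructions; entries 0x106807;
   exits 0x106807,0x10688e,0x106874; ranges 0x106807-0x10685e)
   takes each of its entry assertions to one of its exit assertions (`Gif.Spec.DGifDecompressInput.Seg2`), given the contracts of its callees.
   What the names mean: ProgX/Base/Spec/Basic.lean (the shared hypotheses), Gif/Spec/Seg_DGifDecompressInput.lean (the assertions). The theorem to prove: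
   `theorem DGifDecompressInput_2_ok : Gif.Spec.DGifDecompressInput_2.Statement`. -/
import Gif.Code
import Gif.Dec.All
import Gif.Labels
import Gif.Spec.Reader
import Gif.Spec.Seg_DGifDecompressInput
namespace Gif.Spec.DGifDecompressInput_2
open X86 X86.User Asan

/-- The statement of unit `DGifDecompressInput.2`. -/
def Statement : Prop :=
  ∀ (Lay : Layout) (_hLay : Lay.hi = 0x1000000) (μ : Microarch) (_hμ : UserX.MicroOK μ) (u₀ : State)
    (_hcode : HasCodeNat Lay u₀ Gif.L.DGifDecompressInput.entry Gif.Code.code_DGifDecompressInput.nat Gif.L.DGifDecompressInput.size)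
    (_h_DGifBufferedInput : ∀ (H : Heap) (rest : List Obj) (frames : List (Nat × FrameLayout)) (F : Forest) (R : Rd), Calls Lay μ ProgX.Base.WayInv (ProgX.Base.conv u₀) Gif.L.DGifBufferedInput.entry (Gif.Spec.DGifBufferedInput.spec H rest frames F R))
    (_h_asan_load4_noabort : Asan.SmallCheck Lay μ ProgX.Base.WayInv (ProgX.Base.CodeOK u₀) [.rax, .rcx, .rdx] 4 ProgX.Base.L.__asan_load4_noabort.entry)
    (_h_asan_load8_noabort : Asan.SmallCheck Lay μ ProgX.Base.WayInv (ProgX.Base.CodeOK u₀) [.rax, .rcx, .rdx] 8 ProgX.Base.L.__asan_load8_noabort.entry),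
    Gif.Spec.DGifDecompressInput.Seg2 Lay μ u₀

end Gif.Spec.DGifDecompressInput_2
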